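-- pv_equiv track=rewrite | github.com/kvnn/blackbart | blackbart/apps/miner/scraper/spiders.py | remove_bad_prefixes
-- ===== SOURCE A (Python) =====
-- def remove_bad_prefixes(title):
--     # TODO: Its possible for this to return None, which is bad, e.g. for title
--     # '[Bitcoin-development][bitcoin-dev] [Bitcoin-development]Why not Child-Pays-For-Parent?'
--     bads = ['[bitcoin-dev]',
--             '[Bitcoin-development]',
--             'Fwd:', 'Re:', '[Bulk]']
--     for bad in bads:
--         if bad in title and title.strip().index(bad) == 0:
--             title = title[len(bad):].strip()
--             return remove_bad_prefixes(title)
--     return title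
-- ===== SOURCE B (Python) =====
-- def remove_bad_prefixes(title):
--     bads = ['[bitcoin-dev]',
--             '[Bitcoin-development]',
--             'Fwd:', 'Re:', '[Bulk]']
--     s = title.strip()
--     changed = False
--     while True:
--         for b in bads:
--             if s.startswith(b):
--                 s = s[len(b):].lstrip()
--                 changed = True
--                 break
--         else:
--             return s if changed else title
-- ===== Notes on version B (the rewrite author's own statement) =====
-- stated objective: alternative
-- what changed: Strips the title once up front and then runs an iterative worker loop over that core with a changed flag, testing with startswith and doing only an lstrip after each slice (the right end never needs re-stripping), instead of A's tail recursion that re-strips and re-scans the raw title with membership-plus-index tests on every call.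
-- intended difference: On titles whose stripped form starts with a bad prefix but that carry fewer leading whitespace characters than that prefix is long, the original slices the prefix length off the raw title and returns a garbled tail still containing the end of the prefix, while the new implementation removes the whole prefix from the stripped title, which is the intended cleanup. — e.g. on remove_bad_prefixes(" Re: A"): A returns ": A", B returns "A"
import Mathlib
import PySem

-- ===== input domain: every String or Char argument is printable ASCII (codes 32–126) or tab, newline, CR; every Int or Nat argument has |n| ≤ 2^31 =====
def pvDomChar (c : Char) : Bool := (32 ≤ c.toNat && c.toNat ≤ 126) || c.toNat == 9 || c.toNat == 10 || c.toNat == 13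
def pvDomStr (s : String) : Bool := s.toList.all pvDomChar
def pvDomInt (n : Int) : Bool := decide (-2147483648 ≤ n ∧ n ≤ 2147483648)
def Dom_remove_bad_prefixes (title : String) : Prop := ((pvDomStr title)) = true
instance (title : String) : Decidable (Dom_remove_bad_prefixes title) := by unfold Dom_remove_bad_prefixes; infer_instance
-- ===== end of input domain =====

-- B strips the title once up front and then iterates a worker loop with a changed flag,
-- testing with startswith and lstrip-ing after each slice, instead of A's tail recursion
-- that re-strips and re-scans the raw title; A's misaligned slice on whitespace-prefixed
-- titles is stated as the intended difference D_ below.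

def pvBads : List String := ["[bitcoin-dev]", "[Bitcoin-development]", "Fwd:", "Re:", "[Bulk]"]

-- facts cited by the ports' decreasing_by (must precede the ports)
theorem pvRstripPrefix (l : List Char) : PySem.Chars.rstrip l <+: l := by
  unfold PySem.Chars.rstrip
  have h : List.dropWhile PySem.Chars.isspace l.reverse <:+ l.reverse :=
    List.dropWhile_suffix _
  have := List.reverse_prefix.mpr h
  simpa using this

theorem pvStripInfix (l : List Char) : PySem.Chars.strip l <:+: l := by
  unfold PySem.Chars.strip PySem.Chars.lstrip
  exact List.IsInfix.trans (pvRstripPrefix _).isInfix (List.dropWhile_suffix _).isInfix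

theorem pvStripLen (l : List Char) : (PySem.Chars.strip l).length ≤ l.length :=
  (pvStripInfix l).length_le

theorem pvSliceToList (s : String) (n : Nat) :
    (PySem.Str.slice s (some (n:Int)) none).toList = s.toList.drop n := by
  rw [PySem.Str.toList_slice, PySem.Chars.slice_eq_listSlice,
    PySem.List.slice_from _ (by positivity : (0:Int) ≤ (n:Int))]
  simp

-- ===== PORT A =====
-- termination helper for port A (cited by decreasing_by)
theorem pvDecA (title bad : String)
    (h : pvBads.find? (fun bad => PySem.Str.isIn bad title &&
          (PySem.Str.find (PySem.Str.strip title) bad == 0)) = some bad) :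
    (PySem.Str.strip (PySem.Str.slice title (some (bad.length : Int)) none)).toList.length
      < title.toList.length := by
  have hpred := List.find?_some h
  have hmem := List.mem_of_find?_eq_some h
  have hpos : 0 < bad.toList.length := by
    fin_cases hmem <;> decide
  have hin : PySem.Str.isIn bad title = true := by
    have := Bool.and_elim_left hpred
    simpa using this
  have hle : bad.toList.length ≤ title.toList.length := by
    rw [PySem.Str.isIn_eq] at hin
    exact ((PySem.Chars.isIn_iff_infix _ _).mp hin).length_le
  have h1 := pvStripLen (PySem.Str.slice title (some (bad.length : Int)) none).toList
  rw [PySem.Str.toList_strip]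
  have h2 : (PySem.Str.slice title (some (bad.length : Int)) none).toList
      = title.toList.drop bad.toList.length := by
    have := pvSliceToList title bad.length
    simpa using this
  rw [h2] at h1 ⊢
  have h3 : (title.toList.drop bad.toList.length).length
      = title.toList.length - bad.toList.length := List.length_drop ..
  omega

-- Python's `title.strip().index(bad)` is ported as PySem.Str.find: in the branch where it is
-- evaluated, the guard `bad in title` holds and bad (whitespace-free) then also occurs in
-- title.strip(), where .index and .find coincide; so the port is exact on every input.
def remove_bad_prefixes (title : String) : String :=
  match h : pvBads.find? (fun bad => PySem.Str.isIn bad title &&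
      (PySem.Str.find (PySem.Str.strip title) bad == 0)) with
  | some bad => remove_bad_prefixes (PySem.Str.strip (PySem.Str.slice title (some (bad.length : Int)) none))
  | none => title
termination_by title.toList.length
decreasing_by exact pvDecA title bad h

-- ===== PORT B =====
-- termination helper for the worker loop (cited by decreasing_by)
theorem pvDecC (s b : String)
    (h : pvBads.find? (fun b => PySem.Str.startswith s b) = some b) :
    (PySem.Str.lstrip (PySem.Str.slice s (some (b.length : Int)) none)).toList.length
      < s.toList.length := by
  have hpred := List.find?_some h
  have hmem := List.mem_of_find?_eq_some h
  have hpos : 0 < b.toList.length := by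
    fin_cases hmem <;> decide
  have hsw : b.toList <+: s.toList := by
    rw [PySem.Str.startswith_eq] at hpred
    exact (PySem.Chars.startswith_iff _ _).mp hpred
  have hle : b.toList.length ≤ s.toList.length := hsw.length_le
  have h2 : (PySem.Str.slice s (some (b.length : Int)) none).toList
      = s.toList.drop b.toList.length := by
    have := pvSliceToList s b.length
    simpa using this
  rw [PySem.Str.toList_lstrip, h2]
  have h1 : (PySem.Chars.lstrip (s.toList.drop b.toList.length)).length
      ≤ (s.toList.drop b.toList.length).length :=
    (List.dropWhile_suffix _).length_le
  have h3 : (s.toList.drop b.toList.length).length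
      = s.toList.length - b.toList.length := List.length_drop ..
  omega

-- the `while True` worker: s is the current core, changed records whether anything was cut
def pvAltLoop (s : String) (changed : Bool) (title : String) : String :=
  match h : pvBads.find? (fun b => PySem.Str.startswith s b) with
  | some b => pvAltLoop (PySem.Str.lstrip (PySem.Str.slice s (some (b.length : Int)) none)) true title
  | none => if changed then s else title
termination_by s.toList.length
decreasing_by exact pvDecC s b h

def remove_bad_prefixes_alt (title : String) : String :=
  pvAltLoop (PySem.Str.strip title) false title

-- ===== PRECONDITION & SPEC =====
-- On titles whose stripped form starts with a bad prefix but which carry fewer leading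
-- whitespace characters than that prefix is long, A slices len(bad) characters off the RAW
-- title after testing the STRIPPED title, so it chops the whitespace plus only part of the
-- prefix and returns a garbled tail still containing the end of the prefix, while B
-- removes the whole prefix from the stripped title, which is the intended cleanup.
def D_remove_bad_prefixes (title : String) : Prop :=
  ∃ bad ∈ pvBads, PySem.Str.startswith (PySem.Str.strip title) bad = true ∧
    0 < title.toList.length - (PySem.Chars.lstrip title.toList).length ∧
    title.toList.length - (PySem.Chars.lstrip title.toList).length < bad.length
instance (title : String) : Decidable (D_remove_bad_prefixes title) := by
  unfold D_remove_bad_prefixes; infer_instance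

def Spec_remove_bad_prefixes (title : String) (out : String) : Prop :=
  ¬ D_remove_bad_prefixes title → out = remove_bad_prefixes_alt title
instance (title : String) (out : String) : Decidable (Spec_remove_bad_prefixes title out) := by
  unfold Spec_remove_bad_prefixes; infer_instance

def pvDiffWitness_remove_bad_prefixes : String := " Re: A"
def pvDiffWitnessOut_remove_bad_prefixes : String × String := (": A", "A")

-- ===== CLAIM (what is proved, stated in full; the proofs are below) =====
def Claim_unchanged_remove_bad_prefixes : Prop := ∀ (title : String), Dom_remove_bad_prefixes title → Spec_remove_bad_prefixes title (remove_bad_prefixes title)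
def Claim_exact_remove_bad_prefixes : Prop := ∀ (title : String), Dom_remove_bad_prefixes title → D_remove_bad_prefixes title → remove_bad_prefixes title ≠ remove_bad_prefixes_alt title
def Claim_changed_remove_bad_prefixes : Prop := Dom_remove_bad_prefixes (pvDiffWitness_remove_bad_prefixes) ∧ D_remove_bad_prefixes (pvDiffWitness_remove_bad_prefixes) ∧ remove_bad_prefixes (pvDiffWitness_remove_bad_prefixes) = pvDiffWitnessOut_remove_bad_prefixes.1 ∧ remove_bad_prefixes_alt (pvDiffWitness_remove_bad_prefixes) = pvDiffWitnessOut_remove_bad_prefixes.2 ∧ pvDiffWitnessOut_remove_bad_prefixes.1 ≠ pvDiffWitnessOut_remove_bad_prefixes.2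

-- ===== LEMMAS AND PROOFS =====

theorem pvDropWhileIdem (p : Char → Bool) (l : List Char) :
    List.dropWhile p (List.dropWhile p l) = List.dropWhile p l := by
  induction l with
  | nil => rfl
  | cons c cs ih =>
    by_cases h : p c
    · simp [h, ih]
    · simp [h]

theorem pvLstripPrefixKeep (l p : List Char) (hl : PySem.Chars.lstrip l = l)
    (hp : p <+: l) : PySem.Chars.lstrip p = p := by
  unfold PySem.Chars.lstrip at *
  cases l with
  | nil => simp [List.prefix_nil.mp hp]
  | cons c cs =>
    have hc : ¬ (PySem.Chars.isspace c = true) := by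
      intro hsp
      rw [List.dropWhile_cons, if_pos hsp] at hl
      have h1 := congrArg List.length hl
      have h2 := (List.dropWhile_suffix (l := cs) PySem.Chars.isspace).length_le
      simp at h1
      omega
    cases p with
    | nil => rfl
    | cons d ds =>
      obtain ⟨t, ht⟩ := hp
      have hd : d = c := by
        have := congrArg (·.head?) ht
        simpa using this
      subst hd
      simp [hc]

theorem pvRstripIdem (l : List Char) : PySem.Chars.rstrip (PySem.Chars.rstrip l) = PySem.Chars.rstrip l := by
  unfold PySem.Chars.rstrip
  rw [List.reverse_reverse, pvDropWhileIdem]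

theorem pvLstripStrip (l : List Char) : PySem.Chars.lstrip (PySem.Chars.strip l) = PySem.Chars.strip l := by
  unfold PySem.Chars.strip
  apply pvLstripPrefixKeep (PySem.Chars.lstrip l) _ _ (pvRstripPrefix _)
  unfold PySem.Chars.lstrip
  exact pvDropWhileIdem _ _

theorem pvStripIdem (l : List Char) : PySem.Chars.strip (PySem.Chars.strip l) = PySem.Chars.strip l := by
  have h := pvLstripStrip l
  calc PySem.Chars.strip (PySem.Chars.strip l)
      = PySem.Chars.rstrip (PySem.Chars.lstrip (PySem.Chars.strip l)) := rfl
    _ = PySem.Chars.rstrip (PySem.Chars.strip l) := by rw [h]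
    _ = PySem.Chars.rstrip (PySem.Chars.rstrip (PySem.Chars.lstrip l)) := rfl
    _ = PySem.Chars.rstrip (PySem.Chars.lstrip l) := pvRstripIdem _
    _ = PySem.Chars.strip l := rfl

theorem pvStripIdemStr (s : String) :
    PySem.Str.strip (PySem.Str.strip s) = PySem.Str.strip s := by
  apply String.toList_inj.mp
  rw [PySem.Str.toList_strip, PySem.Str.toList_strip, pvStripIdem]

theorem pvWsAppendRstrip (u v : List Char) (hv : ∀ c ∈ v, PySem.Chars.isspace c = true) :
    PySem.Chars.rstrip (u ++ v) = PySem.Chars.rstrip u := by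
  unfold PySem.Chars.rstrip
  rw [List.reverse_append, List.dropWhile_append]
  have : List.dropWhile PySem.Chars.isspace v.reverse = [] :=
    List.dropWhile_eq_nil_iff.mpr (by simpa using hv)
  simp [this]

theorem pvWsAppendStrip (u v : List Char) (hv : ∀ c ∈ v, PySem.Chars.isspace c = true) :
    PySem.Chars.strip (u ++ v) = PySem.Chars.strip u := by
  unfold PySem.Chars.strip PySem.Chars.lstrip
  rw [List.dropWhile_append]
  by_cases h : (List.dropWhile PySem.Chars.isspace u).isEmpty
  · rw [if_pos h]
    have hu : List.dropWhile PySem.Chars.isspace u = [] := by simpa using h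
    have hv' : List.dropWhile PySem.Chars.isspace v = [] :=
      List.dropWhile_eq_nil_iff.mpr hv
    rw [hu, hv']
  · rw [if_neg h]
    exact pvWsAppendRstrip _ _ hv

theorem pvWsPrependStrip (u v : List Char) (hu : ∀ c ∈ u, PySem.Chars.isspace c = true) :
    PySem.Chars.strip (u ++ v) = PySem.Chars.strip v := by
  unfold PySem.Chars.strip PySem.Chars.lstrip
  rw [List.dropWhile_append]
  have hu' : List.dropWhile PySem.Chars.isspace u = [] := List.dropWhile_eq_nil_iff.mpr hu
  simp [hu']

theorem pvStripDropRstrip (l : List Char) (n : Nat) :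
    PySem.Chars.strip ((PySem.Chars.rstrip l).drop n) = PySem.Chars.strip (l.drop n) := by
  have hdec : PySem.Chars.rstrip l ++ (List.takeWhile PySem.Chars.isspace l.reverse).reverse = l := by
    unfold PySem.Chars.rstrip
    rw [← List.reverse_append, List.takeWhile_append_dropWhile, List.reverse_reverse]
  have hws : ∀ c ∈ (List.takeWhile PySem.Chars.isspace l.reverse).reverse,
      PySem.Chars.isspace c = true := by
    intro c hc
    exact List.mem_takeWhile_imp (List.mem_reverse.mp hc)
  conv_rhs => rw [← hdec]
  rw [List.drop_append]
  rw [pvWsAppendStrip _ _ (fun c hc => hws c (List.mem_of_mem_drop hc))]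

theorem pvStripDropOfWsPrefix (l : List Char) (n : Nat)
    (h : ∀ c ∈ l.take n, PySem.Chars.isspace c = true) :
    PySem.Chars.strip (l.drop n) = PySem.Chars.strip l := by
  conv_rhs => rw [← List.take_append_drop n l]
  rw [pvWsPrependStrip _ _ h]

theorem pvPredEq (cs bad : List Char) :
    (PySem.Chars.isIn bad cs && (PySem.Chars.find (PySem.Chars.strip cs) bad == 0))
      = PySem.Chars.startswith (PySem.Chars.strip cs) bad := by
  rw [Bool.eq_iff_iff]
  simp only [Bool.and_eq_true, beq_iff_eq, PySem.Chars.startswith_iff, PySem.Chars.isIn_iff_infix]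
  constructor
  · rintro ⟨-, hf⟩
    have h0 : (0:Int) ≤ PySem.Chars.find (PySem.Chars.strip cs) bad := by rw [hf]
    have := (PySem.Chars.find_spec h0).1
    rw [hf] at this
    simpa using this
  · intro hpre
    have hinf : bad <:+: PySem.Chars.strip cs := hpre.isInfix
    have hge : (0:Int) ≤ PySem.Chars.find (PySem.Chars.strip cs) bad :=
      (PySem.Chars.find_nonneg_iff _ _).mpr hinf
    refine ⟨hinf.trans (pvStripInfix cs), ?_⟩
    by_contra hne
    have hpos : 0 < (PySem.Chars.find (PySem.Chars.strip cs) bad).toNat := by omega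
    exact ((PySem.Chars.find_spec hge).2 0 hpos) (by simpa using hpre)

theorem pvPredEqStr (title : String) :
    (fun bad => PySem.Str.isIn bad title && (PySem.Str.find (PySem.Str.strip title) bad == 0))
      = (fun bad : String => PySem.Str.startswith (PySem.Str.strip title) bad) := by
  funext bad
  simp only [PySem.Str.isIn_eq, PySem.Str.find_eq, PySem.Str.startswith_eq, PySem.Str.toList_strip]
  exact pvPredEq _ _

theorem pvKZero (cs : List Char) (h : cs.length - (PySem.Chars.lstrip cs).length = 0) :
    PySem.Chars.lstrip cs = cs := by
  unfold PySem.Chars.lstrip at *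
  have hs := List.dropWhile_suffix (l := cs) PySem.Chars.isspace
  exact hs.eq_of_length (by have := hs.length_le; omega)

theorem pvTakeWs (cs : List Char) (n : Nat)
    (h : n ≤ cs.length - (PySem.Chars.lstrip cs).length) :
    ∀ c ∈ cs.take n, PySem.Chars.isspace c = true := by
  unfold PySem.Chars.lstrip at h
  have hlen : (List.takeWhile PySem.Chars.isspace cs).length
      + (List.dropWhile PySem.Chars.isspace cs).length = cs.length := by
    conv_rhs => rw [← List.takeWhile_append_dropWhile (p := PySem.Chars.isspace) (l := cs)]
    rw [List.length_append]
  have hn : n ≤ (List.takeWhile PySem.Chars.isspace cs).length := by omega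
  intro c hc
  obtain ⟨t, ht⟩ := List.takeWhile_prefix (l := cs) (p := PySem.Chars.isspace)
  rw [← ht, List.take_append, Nat.sub_eq_zero_of_le hn] at hc
  simp only [List.take_zero, List.append_nil] at hc
  exact List.mem_takeWhile_imp (List.mem_of_mem_take hc)

-- one-step unfolding lemmas for the two ports
theorem pvAnone (title : String)
    (h : List.find? (fun bad => PySem.Str.isIn bad title &&
      (PySem.Str.find (PySem.Str.strip title) bad == 0)) pvBads = none) :
    remove_bad_prefixes title = title := by
  rw [remove_bad_prefixes.eq_def]
  split
  · rename_i bad hbad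
    rw [h] at hbad
    exact absurd hbad (by simp)
  · rfl

theorem pvAstep (title bad : String)
    (h : List.find? (fun bad => PySem.Str.isIn bad title &&
      (PySem.Str.find (PySem.Str.strip title) bad == 0)) pvBads = some bad) :
    remove_bad_prefixes title
      = remove_bad_prefixes (PySem.Str.strip (PySem.Str.slice title (some (bad.length : Int)) none)) := by
  rw [remove_bad_prefixes.eq_def]
  split
  · rename_i bad' hbad
    rw [h] at hbad
    obtain rfl : bad' = bad := by injection hbad with h'; exact h'.symm
    rfl
  · rename_i hbad
    rw [h] at hbad
    exact absurd hbad (by simp)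

theorem pvCnone (s : String) (changed : Bool) (title : String)
    (h : List.find? (fun b => PySem.Str.startswith s b) pvBads = none) :
    pvAltLoop s changed title = if changed then s else title := by
  rw [pvAltLoop.eq_def]
  split
  · rename_i b hb
    rw [h] at hb
    exact absurd hb (by simp)
  · rfl

theorem pvCstep (s : String) (changed : Bool) (title b : String)
    (h : List.find? (fun b => PySem.Str.startswith s b) pvBads = some b) :
    pvAltLoop s changed title
      = pvAltLoop (PySem.Str.lstrip (PySem.Str.slice s (some (b.length : Int)) none)) true title := by
  rw [pvAltLoop.eq_def]
  split
  · rename_i b' hb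
    rw [h] at hb
    obtain rfl : b' = b := by injection hb with h'; exact h'.symm
    rfl
  · rename_i hb
    rw [h] at hb
    exact absurd hb (by simp)

-- strip-fixed strings are rstrip-fixed, and lstrip = strip on a slice of one
theorem pvStripFixRstrip (l : List Char) (h : PySem.Chars.strip l = l) :
    PySem.Chars.rstrip l = l := by
  conv_lhs => rw [← h]
  show PySem.Chars.rstrip (PySem.Chars.rstrip (PySem.Chars.lstrip l)) = l
  rw [pvRstripIdem]
  exact h

theorem pvDropWhileEqSelf (p : Char → Bool) (l : List Char) (c : Char)
    (hc : l.head? = some c) (hp : p c = false) : List.dropWhile p l = l := by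
  cases l with
  | nil => rfl
  | cons d ds =>
    obtain rfl : d = c := by simpa using hc
    simp [hp]

theorem pvHeadNonspaceOfRstripFix (y : List Char)
    (h' : List.dropWhile PySem.Chars.isspace y.reverse = y.reverse) :
    ∀ c, y.reverse.head? = some c → PySem.Chars.isspace c = false := by
  intro c hc
  cases hyr : y.reverse with
  | nil => rw [hyr] at hc; simp at hc
  | cons d ds =>
    rw [hyr] at hc h'
    obtain rfl : d = c := by simpa using hc
    by_contra hcs
    simp only [Bool.not_eq_false] at hcs
    rw [List.dropWhile_cons, if_pos hcs] at h'
    have h1 := congrArg List.length h'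
    have h2 := (List.dropWhile_suffix (l := ds) PySem.Chars.isspace).length_le
    simp at h1
    omega

theorem pvRstripFixDrop (y : List Char) (m : Nat) (h : PySem.Chars.rstrip y = y) :
    PySem.Chars.rstrip (y.drop m) = y.drop m := by
  unfold PySem.Chars.rstrip at *
  have h' : List.dropWhile PySem.Chars.isspace y.reverse = y.reverse := by
    have := congrArg List.reverse h
    simpa using this
  cases hy : (y.drop m).reverse with
  | nil =>
    have : (y.drop m) = [] := by simpa using congrArg List.reverse hy
    rw [this]
    rfl
  | cons c rest =>
    have hne : y.drop m ≠ [] := by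
      intro h0
      rw [h0] at hy
      simp at hy
    have hmlt : m < y.length := by
      by_contra hge
      exact hne (List.drop_eq_nil_of_le (by omega))
    have hhead : y.reverse.head? = some c := by
      have e1 : (y.drop m).reverse.head? = some c := by rw [hy]; rfl
      rw [List.head?_reverse] at e1 ⊢
      rw [List.getLast?_drop] at e1
      · rwa [if_neg (by omega)] at e1
    have hlast : PySem.Chars.isspace c = false :=
      pvHeadNonspaceOfRstripFix y h' c hhead
    rw [pvDropWhileEqSelf _ _ c rfl hlast]
    simpa using (congrArg List.reverse hy).symm

theorem pvLstripDropEqStripDrop (l : List Char) (n : Nat)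
    (h : PySem.Chars.rstrip l = l) :
    PySem.Chars.lstrip (l.drop n) = PySem.Chars.strip (l.drop n) := by
  have hdropfix : PySem.Chars.rstrip (l.drop n) = l.drop n := pvRstripFixDrop l n h
  -- lstrip (l.drop n) is a suffix of l.drop n, hence a drop of l, hence rstrip-fixed
  obtain ⟨u, hu⟩ : PySem.Chars.lstrip (l.drop n) <:+ l.drop n := List.dropWhile_suffix _
  have hdd : PySem.Chars.lstrip (l.drop n) = (l.drop n).drop u.length := by
    conv_rhs => rw [← hu, List.drop_left]
  have hfix : PySem.Chars.rstrip (PySem.Chars.lstrip (l.drop n)) = PySem.Chars.lstrip (l.drop n) := by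
    rw [hdd, List.drop_drop]
    exact pvRstripFixDrop l _ h
  show PySem.Chars.lstrip (l.drop n) = PySem.Chars.rstrip (PySem.Chars.lstrip (l.drop n))
  exact hfix.symm

-- B's lstrip after the slice agrees with a full strip, on any strip-fixed core
theorem pvLstripSliceEqStripSlice (s : String) (n : Nat)
    (hfix : PySem.Str.strip s = s) :
    PySem.Str.lstrip (PySem.Str.slice s (some (n : Int)) none)
      = PySem.Str.strip (PySem.Str.slice s (some (n : Int)) none) := by
  apply String.toList_inj.mp
  rw [PySem.Str.toList_lstrip, PySem.Str.toList_strip, pvSliceToList]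
  apply pvLstripDropEqStripDrop
  apply pvStripFixRstrip
  have := congrArg String.toList hfix
  rwa [PySem.Str.toList_strip] at this

-- core agreement: on a strip-fixed core s, A's recursion tracks B's worker loop (changed = true)
theorem pvCore : ∀ (N : Nat) (s title : String), s.toList.length < N →
    PySem.Str.strip s = s → remove_bad_prefixes s = pvAltLoop s true title := by
  intro N
  induction N with
  | zero => intro s title h; omega
  | succ n ih =>
    intro s title hN hfix
    cases hf : List.find? (fun b => PySem.Str.startswith s b) pvBads with
    | none =>
      have hfA : List.find? (fun bad => PySem.Str.isIn bad s &&
          (PySem.Str.find (PySem.Str.strip s) bad == 0)) pvBads = none := by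
        rw [pvPredEqStr s, hfix]; exact hf
      rw [pvAnone s hfA, pvCnone s true title hf, if_pos rfl]
    | some b =>
      have hfA : List.find? (fun bad => PySem.Str.isIn bad s &&
          (PySem.Str.find (PySem.Str.strip s) bad == 0)) pvBads = some b := by
        rw [pvPredEqStr s, hfix]; exact hf
      rw [pvAstep s b hfA, pvCstep s true title b hf]
      have harg : PySem.Str.lstrip (PySem.Str.slice s (some (b.length : Int)) none)
          = PySem.Str.strip (PySem.Str.slice s (some (b.length : Int)) none) :=
        pvLstripSliceEqStripSlice s b.length hfix
      rw [harg]
      have hlt := pvDecC s b hf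
      rw [harg] at hlt
      exact ih _ title (by omega) (pvStripIdemStr _)

-- ===== proof of the tight claim: A and B differ on EVERY input of D_ =====

set_option maxRecDepth 4096 in
theorem pvBadsFactsBool : ∀ b ∈ pvBads,
    (!b.toList.isEmpty && b.toList.all (fun c => !PySem.Chars.isspace c)) = true := by
  decide

theorem pvBadsFacts (b : String) (hb : b ∈ pvBads) :
    b.toList ≠ [] ∧ ∀ c ∈ b.toList, PySem.Chars.isspace c = false := by
  have := pvBadsFactsBool b hb
  rw [Bool.and_eq_true, List.all_eq_true] at this
  refine ⟨by simpa using this.1, fun c hc => by simpa using this.2 c hc⟩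

set_option maxRecDepth 4096 in
theorem pvBadsNoMutualPrefixBool : ∀ b1 ∈ pvBads, ∀ b2 ∈ pvBads,
    b1.toList.isPrefixOf b2.toList = true → b1 = b2 := by
  decide

theorem pvBadsNoMutualPrefix : ∀ b1 ∈ pvBads, ∀ b2 ∈ pvBads, b1.toList <+: b2.toList → b1 = b2 := by
  intro b1 h1 b2 h2 hp
  exact pvBadsNoMutualPrefixBool b1 h1 b2 h2 (List.isPrefixOf_iff_prefix.mpr hp)

set_option maxRecDepth 4096 in
theorem pvFragHeadBool : ∀ b ∈ pvBads, ∀ b' ∈ pvBads,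
    (b.toList.drop 1).all (fun c => b'.toList.head? != some c) = true := by
  decide

theorem pvFragHead (b : String) (hb : b ∈ pvBads) (c : Char) (hc : c ∈ b.toList.drop 1)
    (b' : String) (hb' : b' ∈ pvBads) : b'.toList.head? ≠ some c := by
  have := pvFragHeadBool b hb b' hb'
  rw [List.all_eq_true] at this
  simpa using this c hc

theorem pvUniquePrefix (s : List Char) (b1 b2 : String) (h1 : b1 ∈ pvBads) (h2 : b2 ∈ pvBads)
    (p1 : b1.toList <+: s) (p2 : b2.toList <+: s) : b1 = b2 := by
  rcases List.prefix_or_prefix_of_prefix p1 p2 with h | h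
  · exact pvBadsNoMutualPrefix b1 h1 b2 h2 h
  · exact (pvBadsNoMutualPrefix b2 h2 b1 h1 h).symm

theorem pvCLenAux : ∀ (N : Nat) (s title : String), s.toList.length < N →
    (pvAltLoop s true title).toList.length ≤ s.toList.length := by
  intro N
  induction N with
  | zero => intro s title h; omega
  | succ n ih =>
    intro s title h
    cases hf : List.find? (fun b => PySem.Str.startswith s b) pvBads with
    | none => rw [pvCnone s true title hf, if_pos rfl]
    | some b =>
      rw [pvCstep s true title b hf]
      have hlt := pvDecC s b hf
      have := ih (PySem.Str.lstrip (PySem.Str.slice s (some (b.length : Int)) none)) title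
        (by omega)
      omega

theorem pvRstripDecomp (l : List Char) :
    PySem.Chars.rstrip l ++ (List.takeWhile PySem.Chars.isspace l.reverse).reverse = l := by
  unfold PySem.Chars.rstrip
  rw [← List.reverse_append, List.takeWhile_append_dropWhile, List.reverse_reverse]

theorem pvDropDecomp (W R S E bt t : List Char) (k n : Nat)
    (hW : W.length = k) (hSE : S ++ E = R) (hbt : bt ++ t = S) (hn : bt.length = n)
    (hk : k ≤ n) :
    (W ++ R).drop n = (bt.drop (n - k) ++ t) ++ E := by
  rw [List.drop_append, List.drop_eq_nil_of_le (by omega), List.nil_append, hW,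
    ← hSE, ← hbt, List.drop_append, List.drop_append]
  rw [Nat.sub_eq_zero_of_le (by omega : n - k ≤ bt.length), List.drop_zero]
  rw [List.length_append, Nat.sub_eq_zero_of_le (by omega : n - k ≤ bt.length + t.length),
    List.drop_zero]

theorem remove_bad_prefixes_tight_aux (title : String)
    (hD : D_remove_bad_prefixes title) :
    remove_bad_prefixes title ≠ remove_bad_prefixes_alt title := by
  obtain ⟨bad, hmem, hsw, hk1, hk2⟩ := hD
  have hblen : bad.length = bad.toList.length := by simp
  rw [hblen] at hk2
  obtain ⟨n, hndef⟩ : ∃ n, bad.toList.length = n := ⟨_, rfl⟩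
  rw [hndef] at hk2
  obtain ⟨k, hkdef⟩ : ∃ k, title.toList.length - (PySem.Chars.lstrip title.toList).length = k :=
    ⟨_, rfl⟩
  rw [hkdef] at hk1 hk2
  have hRle : (PySem.Chars.lstrip title.toList).length ≤ title.toList.length :=
    (List.dropWhile_suffix (l := title.toList) PySem.Chars.isspace).length_le
  have hswl : bad.toList <+: PySem.Chars.strip title.toList := by
    rw [PySem.Str.startswith_eq, PySem.Str.toList_strip] at hsw
    exact (PySem.Chars.startswith_iff _ _).mp hsw
  obtain ⟨t, ht⟩ := hswl
  -- the B-side scan finds exactly this prefix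
  have hfB : List.find? (fun b => PySem.Str.startswith (PySem.Str.strip title) b) pvBads
      = some bad := by
    cases hf : List.find? (fun b => PySem.Str.startswith (PySem.Str.strip title) b) pvBads with
    | none =>
      exact absurd hsw (List.find?_eq_none.mp hf bad hmem)
    | some bad' =>
      have h1 := List.find?_some hf
      rw [PySem.Str.startswith_eq, PySem.Str.toList_strip] at h1
      have hpre' := (PySem.Chars.startswith_iff _ _).mp h1
      rw [pvUniquePrefix (PySem.Chars.strip title.toList) bad' bad
        (List.mem_of_find?_eq_some hf) hmem hpre' ⟨t, ht⟩]
  have hfA : List.find? (fun b => PySem.Str.isIn b title &&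
      (PySem.Str.find (PySem.Str.strip title) b == 0)) pvBads = some bad := by
    rw [pvPredEqStr title]; exact hfB
  -- leading-whitespace block
  have hcs : List.takeWhile PySem.Chars.isspace title.toList
      ++ PySem.Chars.lstrip title.toList = title.toList := List.takeWhile_append_dropWhile
  have hWSlen : (List.takeWhile PySem.Chars.isspace title.toList).length = k := by
    have := congrArg List.length hcs
    rw [List.length_append] at this
    omega
  -- trailing-whitespace block of the lstripped title
  have hrest : PySem.Chars.strip title.toList
      ++ (List.takeWhile PySem.Chars.isspace (PySem.Chars.lstrip title.toList).reverse).reverse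
      = PySem.Chars.lstrip title.toList := pvRstripDecomp (PySem.Chars.lstrip title.toList)
  have hwsEnd : ∀ c ∈ (List.takeWhile PySem.Chars.isspace
      (PySem.Chars.lstrip title.toList).reverse).reverse, PySem.Chars.isspace c = true := by
    intro c hc
    exact List.mem_takeWhile_imp (List.mem_reverse.mp hc)
  -- raw title with len(bad) chars removed = frag ++ t ++ wsEnd
  have hdropn : title.toList.drop n
      = (bad.toList.drop (n - k) ++ t)
        ++ (List.takeWhile PySem.Chars.isspace (PySem.Chars.lstrip title.toList).reverse).reverse := by
    conv_lhs => rw [← hcs]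
    exact pvDropDecomp _ _ _ _ _ _ k n hWSlen hrest ht hndef (by omega)
  -- head of the fragment
  have hfraglen : (bad.toList.drop (n - k)).length = k := by
    rw [List.length_drop]
    omega
  have hfragne : bad.toList.drop (n - k) ≠ [] := by
    intro h0
    have := congrArg List.length h0
    rw [hfraglen] at this
    simp at this
    omega
  obtain ⟨c, f', hcf⟩ := List.exists_cons_of_ne_nil hfragne
  have hcmem : c ∈ bad.toList := by
    apply List.mem_of_mem_drop (i := n - k)
    rw [hcf]; exact List.mem_cons_self
  have hcns : PySem.Chars.isspace c = false := (pvBadsFacts bad hmem).2 c hcmem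
  have hcdrop1 : c ∈ bad.toList.drop 1 := by
    apply List.mem_of_mem_drop (i := n - k - 1)
    rw [List.drop_drop]
    have h1k : 1 + (n - k - 1) = n - k := by omega
    rw [h1k, hcf]
    exact List.mem_cons_self
  -- the fragment++tail needs no stripping
  have hfragt_eq : bad.toList.drop (n - k) ++ t
      = (PySem.Chars.strip title.toList).drop (n - k) := by
    rw [← ht, List.drop_append, hndef, Nat.sub_eq_zero_of_le (by omega : n - k ≤ n),
      List.drop_zero]
  have hstripfix : PySem.Chars.strip (bad.toList.drop (n - k) ++ t)
      = bad.toList.drop (n - k) ++ t := by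
    have hl : PySem.Chars.lstrip (bad.toList.drop (n - k) ++ t)
        = bad.toList.drop (n - k) ++ t := by
      rw [hcf]
      show List.dropWhile PySem.Chars.isspace (c :: (f' ++ t)) = c :: (f' ++ t)
      simp [hcns]
    have hfixS : PySem.Chars.rstrip (PySem.Chars.strip title.toList)
        = PySem.Chars.strip title.toList := pvRstripIdem (PySem.Chars.lstrip title.toList)
    have hr : PySem.Chars.rstrip (bad.toList.drop (n - k) ++ t)
        = bad.toList.drop (n - k) ++ t := by
      rw [hfragt_eq]
      exact pvRstripFixDrop _ _ hfixS
    show PySem.Chars.rstrip (PySem.Chars.lstrip _) = _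
    rw [hl, hr]
  -- A's recursion argument, as a list of chars
  have hAtl : (PySem.Str.strip (PySem.Str.slice title (some (bad.length : Int)) none)).toList
      = bad.toList.drop (n - k) ++ t := by
    rw [PySem.Str.toList_strip, pvSliceToList, hblen, hndef, hdropn,
      pvWsAppendStrip _ _ hwsEnd, hstripfix]
  -- A returns that argument unchanged
  have hAval : remove_bad_prefixes title
      = PySem.Str.strip (PySem.Str.slice title (some (bad.length : Int)) none) := by
    rw [pvAstep title bad hfA]
    apply pvAnone
    rw [pvPredEqStr]
    apply List.find?_eq_none.mpr
    intro b' hb' hcontra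
    rw [PySem.Str.startswith_eq, PySem.Str.toList_strip, hAtl, hstripfix] at hcontra
    have hpre := (PySem.Chars.startswith_iff _ _).mp hcontra
    obtain ⟨u, hu⟩ := hpre
    have hb'ne := (pvBadsFacts b' hb').1
    obtain ⟨d, ds, hds⟩ := List.exists_cons_of_ne_nil hb'ne
    have hdc : d = c := by
      have := congrArg List.head? hu
      rw [hds, hcf] at this
      simpa using this
    exact pvFragHead bad hmem c hcdrop1 b' hb' (by rw [hds, hdc]; rfl)
  -- B's first step and a length bound on the rest
  have hBval : remove_bad_prefixes_alt title
      = pvAltLoop (PySem.Str.lstrip (PySem.Str.slice (PySem.Str.strip title)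
          (some (bad.length : Int)) none)) true title := by
    show pvAltLoop (PySem.Str.strip title) false title = _
    exact pvCstep (PySem.Str.strip title) false title bad hfB
  have hBargtl : (PySem.Str.lstrip (PySem.Str.slice (PySem.Str.strip title)
      (some (bad.length : Int)) none)).toList = PySem.Chars.lstrip t := by
    rw [PySem.Str.toList_lstrip, pvSliceToList, PySem.Str.toList_strip, ← ht, hblen,
      List.drop_append, List.drop_eq_nil_of_le (le_refl _), Nat.sub_self, List.drop_zero,
      List.nil_append]
  have hBlen : (remove_bad_prefixes_alt title).toList.length ≤ t.length := by
    rw [hBval]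
    have h1 := pvCLenAux ((PySem.Str.lstrip (PySem.Str.slice (PySem.Str.strip title)
        (some (bad.length : Int)) none)).toList.length + 1)
      (PySem.Str.lstrip (PySem.Str.slice (PySem.Str.strip title)
        (some (bad.length : Int)) none)) title (by omega)
    rw [hBargtl] at h1
    have h2 : (PySem.Chars.lstrip t).length ≤ t.length :=
      (List.dropWhile_suffix _).length_le
    omega
  -- conclude by comparing lengths
  intro heq
  have hlenA : (remove_bad_prefixes title).toList.length = k + t.length := by
    rw [hAval, hAtl, List.length_append, hfraglen]
  rw [heq] at hlenA
  omega

theorem pvMain (title : String) (hD : ¬ D_remove_bad_prefixes title) :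
    remove_bad_prefixes title = remove_bad_prefixes_alt title := by
  show _ = pvAltLoop (PySem.Str.strip title) false title
  cases hfB : List.find? (fun b => PySem.Str.startswith (PySem.Str.strip title) b) pvBads with
  | none =>
    have hfA : List.find? (fun bad => PySem.Str.isIn bad title &&
        (PySem.Str.find (PySem.Str.strip title) bad == 0)) pvBads = none := by
      rw [pvPredEqStr title]; exact hfB
    rw [pvAnone title hfA, pvCnone _ false title hfB, if_neg (by simp)]
  | some bad =>
    have hfA : List.find? (fun bad => PySem.Str.isIn bad title &&
        (PySem.Str.find (PySem.Str.strip title) bad == 0)) pvBads = some bad := by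
      rw [pvPredEqStr title]; exact hfB
    have hmem : bad ∈ pvBads := List.mem_of_find?_eq_some hfB
    have hsw : PySem.Str.startswith (PySem.Str.strip title) bad = true := List.find?_some hfB
    have hpos : 0 < bad.length := by fin_cases hmem <;> decide
    have hk : title.toList.length - (PySem.Chars.lstrip title.toList).length = 0 ∨
        bad.length ≤ title.toList.length - (PySem.Chars.lstrip title.toList).length := by
      by_cases h0 : title.toList.length - (PySem.Chars.lstrip title.toList).length = 0
      · exact Or.inl h0
      · by_cases h1 : bad.length ≤ title.toList.length - (PySem.Chars.lstrip title.toList).length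
        · exact Or.inr h1
        · exact absurd ⟨bad, hmem, hsw, by omega, by omega⟩ hD
    rw [pvAstep title bad hfA, pvCstep _ false title bad hfB]
    have hargB := pvLstripSliceEqStripSlice (PySem.Str.strip title) bad.length
      (pvStripIdemStr title)
    rw [hargB]
    have hargA : (PySem.Str.strip (PySem.Str.slice title (some (bad.length : Int)) none)).toList
        = PySem.Chars.strip (title.toList.drop bad.length) := by
      rw [PySem.Str.toList_strip, pvSliceToList]
    have hargBtl : (PySem.Str.strip (PySem.Str.slice (PySem.Str.strip title)
          (some (bad.length : Int)) none)).toList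
        = PySem.Chars.strip ((PySem.Chars.strip title.toList).drop bad.length) := by
      rw [PySem.Str.toList_strip, pvSliceToList, PySem.Str.toList_strip]
    rcases hk with hk0 | hkge
    · -- no leading whitespace: the two recursion/loop arguments coincide
      have hl : PySem.Chars.lstrip title.toList = title.toList := pvKZero _ hk0
      have hargeq : PySem.Str.strip (PySem.Str.slice title (some (bad.length : Int)) none)
          = PySem.Str.strip (PySem.Str.slice (PySem.Str.strip title)
              (some (bad.length : Int)) none) := by
        apply String.toList_inj.mp
        rw [hargA, hargBtl]
        have : PySem.Chars.strip title.toList = PySem.Chars.rstrip title.toList := by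
          unfold PySem.Chars.strip
          rw [hl]
        rw [this, pvStripDropRstrip]
      rw [hargeq]
      exact pvCore ((PySem.Str.strip (PySem.Str.slice (PySem.Str.strip title)
        (some (bad.length : Int)) none)).toList.length + 1) _ title (by omega)
        (pvStripIdemStr _)
    · -- at least len(bad) leading whitespace: A's slice removes only whitespace
      have hargA' : PySem.Str.strip (PySem.Str.slice title (some (bad.length : Int)) none)
          = PySem.Str.strip title := by
        apply String.toList_inj.mp
        rw [hargA, PySem.Str.toList_strip]
        exact pvStripDropOfWsPrefix _ _ (pvTakeWs _ _ hkge)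
      rw [hargA']
      have hcore := pvCore ((PySem.Str.strip title).toList.length + 1)
        (PySem.Str.strip title) title (by omega) (pvStripIdemStr title)
      rw [hcore]
      rw [pvCstep (PySem.Str.strip title) true title bad hfB]
      rw [pvLstripSliceEqStripSlice (PySem.Str.strip title) bad.length (pvStripIdemStr title)]

-- ===== VERDICT (by name: the statement is the Claim_ definition above) =====
theorem remove_bad_prefixes_spec : Claim_unchanged_remove_bad_prefixes := by
  intro title _ hD
  exact pvMain title hD

theorem remove_bad_prefixes_tight : Claim_exact_remove_bad_prefixes := by
  intro title _ hD
  exact remove_bad_prefixes_tight_aux title hD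

theorem remove_bad_prefixes_changed : Claim_changed_remove_bad_prefixes := by
  unfold Claim_changed_remove_bad_prefixes
  refine ⟨by decide, by decide, ?_, ?_, by decide⟩
  · show remove_bad_prefixes " Re: A" = ": A"
    have h1 : List.find? (fun bad => PySem.Str.isIn bad " Re: A" &&
        (PySem.Str.find (PySem.Str.strip " Re: A") bad == 0)) pvBads = some "Re:" := by decide
    rw [pvAstep _ _ h1]
    have h2 : PySem.Str.strip (PySem.Str.slice " Re: A" (some (("Re:" : String).length : Int)) none)
        = ": A" := by decide
    rw [h2]
    exact pvAnone _ (by decide)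
  · show remove_bad_prefixes_alt " Re: A" = "A"
    show pvAltLoop (PySem.Str.strip " Re: A") false " Re: A" = "A"
    have h1 : List.find? (fun b => PySem.Str.startswith (PySem.Str.strip " Re: A") b) pvBads
        = some "Re:" := by decide
    rw [pvCstep _ false _ _ h1]
    have h2 : PySem.Str.lstrip (PySem.Str.slice (PySem.Str.strip " Re: A")
        (some (("Re:" : String).length : Int)) none) = "A" := by decide
    rw [h2]
    rw [pvCnone _ true _ (by decide), if_pos rfl]
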